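-- pv_equiv track=rewrite | github.com/nguyenngochuy91/Ancestral-Blocks-Reconstruction | find_initial_parent.py | countDup
-- ===== SOURCE A (Python) =====
-- def countDup(Genome):
--     # splitting Genome into blocks of gene
--     gene_list=Genome.split('|')
--     gene_dup=[]
--     # iterate through the list of gene blocks
--     for index in range(len(gene_list)):
--         # iterate through each gene in a gene block
--         for item in range (len(gene_list[index])):
--             # iterate from the index next to our gene (need checking) to the end of the gene block
--             for i in range(item+1, len(gene_list[index])):
--                 if gene_list[index][item] == gene_list[index][i]:
--                     gene_dup.append(gene_list[index][item])
--     return gene_dup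
-- ===== SOURCE B (Python) =====
-- def countDup(Genome):
--     gene_dup = []
--     for block in Genome.split('|'):
--         remaining = {}
--         for c in block:
--             remaining[c] = remaining.get(c, 0) + 1
--         for c in block:
--             remaining[c] -= 1
--             gene_dup.extend([c] * remaining[c])
--     return gene_dup
-- ===== Notes on version B (the rewrite author's own statement) =====
-- stated objective: alternative
-- what changed: Replaces the all-pairs index scan inside each block by a counting pass: a dict of per-character counts is built once per block, then a single forward pass emits each character as many times as it still occurs later (the decremented remaining count), which equals its number of matching later positions; scan cost drops from quadratic to linear per block, though total work is still bounded below by the (possibly quadratic) output length (measured 2.79x at the largest size both finished, unconfirmed at larger sizes).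
import Mathlib
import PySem

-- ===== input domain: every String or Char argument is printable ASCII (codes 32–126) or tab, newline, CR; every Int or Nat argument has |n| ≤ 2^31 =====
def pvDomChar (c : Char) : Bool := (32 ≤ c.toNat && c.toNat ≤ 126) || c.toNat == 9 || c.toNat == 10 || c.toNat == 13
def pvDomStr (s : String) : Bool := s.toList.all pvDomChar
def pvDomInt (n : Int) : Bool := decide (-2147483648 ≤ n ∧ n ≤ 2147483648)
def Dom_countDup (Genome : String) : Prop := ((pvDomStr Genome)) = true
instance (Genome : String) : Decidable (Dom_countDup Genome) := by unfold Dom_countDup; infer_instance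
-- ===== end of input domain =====

-- B replaces A's all-pairs scan per block with one counting pass over a dict of remaining
-- occurrence counts (same return value; a different algorithm, work bounded by output size).

-- ===== PORT A =====
-- one gene block: the two inner index loops of A (item, then i from item+1), appending on equality
def blockA (gd : List String) (s : List Char) : List String :=
  (PySem.List.pyRange 0 (PySem.List.len s)).foldl (fun gd item =>
    (PySem.List.pyRange (item + 1) (PySem.List.len s)).foldl (fun gd i =>
      if PySem.List.pyGetD s item ' ' == PySem.List.pyGetD s i ' '
      then gd ++ [String.ofList [PySem.List.pyGetD s item ' ']]
      else gd) gd) gd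

def countDup (Genome : String) : List String :=
  let gene_list := PySem.Chars.splitOn Genome.toList ['|']
  (PySem.List.pyRange 0 (PySem.List.len gene_list)).foldl
    (fun gd index => blockA gd (PySem.List.pyGetD gene_list index [])) []

-- ===== PORT B =====
-- one gene block of B: build the count dict, then one forward pass emitting each char
-- (remaining count after decrement) times
def blockB (gd : List String) (s : List Char) : List String :=
  let remaining := s.foldl (fun d x => d.modify x 0 (fun x => x + 1))
      (PySem.Dict.empty : PySem.Dict Char Int)
  (s.foldl
    (fun (p : List String × PySem.Dict Char Int) c =>
      let d := p.2.modify c 0 (fun x => x - 1)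
      (p.1 ++ PySem.List.pyRepeat [String.ofList [c]] (d.getD c 0), d))
    (gd, remaining)).1

def countDup_alt (Genome : String) : List String :=
  (PySem.Chars.splitOn Genome.toList ['|']).foldl blockB []

-- ===== PRECONDITION & SPEC =====
def Spec_countDup (Genome : String) (out : List String) : Prop := out = countDup_alt Genome
instance (Genome : String) (out : List String) : Decidable (Spec_countDup Genome out) := by unfold Spec_countDup; infer_instance

-- ===== CLAIM (what is proved, stated in full; the proofs are below) =====
def Claim_equal_countDup : Prop := ∀ (Genome : String), Dom_countDup Genome → Spec_countDup Genome (countDup Genome)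

-- ===== LEMMAS AND PROOFS =====

-- reference value of one block: each char, repeated once per later equal occurrence
def gSpec : List Char → List String
  | [] => []
  | c :: t => List.replicate (t.count c) (String.ofList [c]) ++ gSpec t

theorem blockB_inv (t : List Char) (acc : List String) (d : PySem.Dict Char Int)
    (h : ∀ c, d.getD c 0 = (t.count c : Int)) :
    (t.foldl
      (fun (p : List String × PySem.Dict Char Int) c =>
        let d := p.2.modify c 0 (fun x => x - 1)
        (p.1 ++ PySem.List.pyRepeat [String.ofList [c]] (d.getD c 0), d))
      (acc, d)).1 = acc ++ gSpec t := by
  induction t generalizing acc d with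
  | nil => simp [gSpec]
  | cons c t ih =>
      simp only [List.foldl_cons, gSpec]
      rw [ih]
      · have hc : (d.modify c 0 (fun x => x - 1)).getD c 0 = (t.count c : Int) := by
          rw [PySem.Dict.getD_modify_self, h c, List.count_cons_self]
          push_cast
          ring
        rw [hc, PySem.List.pyRepeat_singleton]
        simp
      · intro x
        by_cases hx : x = c
        · subst hx
          rw [PySem.Dict.getD_modify_self, h x, List.count_cons_self]
          push_cast
          ring
        · rw [PySem.Dict.getD_modify, if_neg hx, h x]
          exact_mod_cast List.count_cons_of_ne (fun h => hx h.symm)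

theorem blockB_eq (gd : List String) (s : List Char) : blockB gd s = gd ++ gSpec s := by
  unfold blockB
  rw [blockB_inv]
  intro c
  rw [PySem.Dict.getD_foldl_modify_add_one]
  simp

-- the index-arithmetic reference form of gSpec
theorem gSpec_range (s : List Char) :
    (List.range s.length).flatMap
      (fun j => List.replicate ((s.drop (j + 1)).count (s.getD j ' ')) (String.ofList [s.getD j ' '])) =
    gSpec s := by
  induction s with
  | nil => simp [gSpec]
  | cons c t ih =>
      rw [List.length_cons, List.range_succ_eq_map]
      simp only [List.flatMap_cons, List.flatMap_map]
      simp only [List.drop_succ_cons, List.getD_cons_succ, List.getD_cons_zero]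
      rw [gSpec, ih]
      simp

theorem blockA_eq (gd : List String) (s : List Char) : blockA gd s = gd ++ gSpec s := by
  unfold blockA
  have hinner : ∀ (gd' : List String) (item : Int),
      (PySem.List.pyRange (item + 1) (PySem.List.len s)).foldl (fun gd i =>
        if PySem.List.pyGetD s item ' ' == PySem.List.pyGetD s i ' '
        then gd ++ [String.ofList [PySem.List.pyGetD s item ' ']]
        else gd) gd' =
      gd' ++ List.replicate
        ((PySem.List.pyRange (item + 1) (PySem.List.len s)).countP
          (fun i => PySem.List.pyGetD s item ' ' == PySem.List.pyGetD s i ' '))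
        (String.ofList [PySem.List.pyGetD s item ' ']) := by
    intro gd' item
    rw [PySem.List.foldl_append_if
      (fun i => PySem.List.pyGetD s item ' ' == PySem.List.pyGetD s i ' ')
      (fun _ => String.ofList [PySem.List.pyGetD s item ' '])]
    rw [List.map_const', List.countP_eq_length_filter]
  simp only [hinner]
  rw [PySem.List.foldl_append_eq_flatMap]
  congr 1
  have hlen : PySem.List.len s = ((s.length : Nat) : Int) := by simp [PySem.List.len]
  rw [hlen, PySem.List.pyRange_zero_nat, List.flatMap_map, ← gSpec_range s]
  apply List.flatMap_congr
  intro j hj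
  have hmap : (PySem.List.pyRange ((j : Int) + 1) (PySem.List.len s)).map
      (fun i => PySem.List.pyGetD s i ' ') = s.drop (j + 1) := by
    have h1 : ((j : Int) + 1).toNat = j + 1 := by omega
    rw [PySem.List.map_pyGetD_pyRange s ' ' (by omega), h1]
  have hcount : (PySem.List.pyRange ((j : Int) + 1) (PySem.List.len s)).countP
      (fun i => s.getD j ' ' == PySem.List.pyGetD s i ' ') =
      (s.drop (j + 1)).count (s.getD j ' ') := by
    have hfun : (fun i => s.getD j ' ' == PySem.List.pyGetD s i ' ') =
        (fun i => PySem.List.pyGetD s i ' ' == s.getD j ' ') :=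
      funext fun i => Bool.beq_comm
    rw [hfun, List.count, ← hmap, List.countP_map]
    rfl
  rw [← hlen]
  simp only [PySem.List.pyGetD_natCast]
  rw [hcount]

-- ===== VERDICT (by name: the statement is the Claim_ definition above) =====
theorem countDup_spec : Claim_equal_countDup := by
  intro Genome _
  unfold Spec_countDup countDup countDup_alt
  rw [PySem.List.foldl_pyRange_zero_pyGetD (PySem.Chars.splitOn Genome.toList ['|']) [] blockA []]
  have hb : blockA = blockB := by
    funext gd s
    rw [blockA_eq, blockB_eq]
  rw [hb]
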